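-- pv_equiv track=rewrite | github.com/quanturong/LLMalMorph3 | src/automation/auto_fixer.py | _group_into_regions
-- ===== SOURCE A (Python) =====
-- from typing import Dict, List, Optional, Tuple
--
-- def _group_into_regions(line_numbers: List[int], margin: int = 40, max_region_lines: int = 200) -> List[Tuple[int, int]]:
--     """Merge nearby error lines into (start, end) regions.
--
--     Adjacent errors within *margin* lines of each other are merged.
--     Each region is expanded by *margin* lines on both sides.
--     Regions exceeding *max_region_lines* are split.
--     """
--     if not line_numbers:
--         return []
--
--     regions: List[Tuple[int, int]] = []
--     current_start = line_numbers[0] - margin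
--     current_end   = line_numbers[0] + margin
--
--     for ln in line_numbers[1:]:
--         if ln - margin <= current_end:
--             # Merge — extend end
--             current_end = ln + margin
--         else:
--             regions.append((max(1, current_start), current_end))
--             current_start = ln - margin
--             current_end   = ln + margin
--
--     regions.append((max(1, current_start), current_end))
--
--     # Split any region that is too large
--     final: List[Tuple[int, int]] = []
--     for s, e in regions:
--         while e - s + 1 > max_region_lines:
--             final.append((s, s + max_region_lines - 1))
--             s += max_region_lines
--         final.append((s, e))
--
--     return final
-- ===== SOURCE B (Python) =====
-- from typing import List, Tuple
--
-- def _group_into_regions(line_numbers: List[int], margin: int = 40, max_region_lines: int = 200) -> List[Tuple[int, int]]: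
--     """Merge nearby error lines into (start, end) regions.
--
--     Stateless decomposition: a line starts a cluster iff the gap from its
--     predecessor exceeds 2*margin, and ends one iff the gap to its successor
--     does; cluster (first, last) pairs are zipped from two filtered
--     comprehensions over adjacent pairs.  Each cluster's expanded region is
--     then chunked by zipping an arithmetic progression of chunk starts with
--     its shifted ends.
--     """
--     if not line_numbers:
--         return []
--     big_gap = [(a, b) for a, b in zip(line_numbers, line_numbers[1:]) if b - a > 2 * margin]
--     firsts = [line_numbers[0]] + [b for _, b in big_gap]
--     lasts = [a for a, _ in big_gap] + [line_numbers[-1]]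
--     M = max_region_lines
--     out: List[Tuple[int, int]] = []
--     for first, last in zip(firsts, lasts):
--         s = max(1, first - margin)
--         e = last + margin
--         starts = [s + k * M for k in range(max(0, (e - s) // M) + 1)]
--         out += list(zip(starts, [t - 1 for t in starts[1:]] + [e]))
--     return out
-- ===== Notes on version B (the rewrite author's own statement) =====
-- stated objective: alternative
-- what changed: B eliminates A's running current_start/current_end state entirely: cluster boundaries are computed statelessly (a line opens a cluster iff the gap from its predecessor exceeds 2*margin, closes one iff the gap to its successor does), cluster (first,last) pairs are zipped from two filtered comprehensions, and A's oversized-split while-loop is replaced by zipping an arithmetic progression of chunk starts with its shifted ends.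
-- outside the precondition, e.g. on _group_into_regions([5], -3, 0): A returns [(8, 2)], B raises ZeroDivisionError
import Mathlib
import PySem

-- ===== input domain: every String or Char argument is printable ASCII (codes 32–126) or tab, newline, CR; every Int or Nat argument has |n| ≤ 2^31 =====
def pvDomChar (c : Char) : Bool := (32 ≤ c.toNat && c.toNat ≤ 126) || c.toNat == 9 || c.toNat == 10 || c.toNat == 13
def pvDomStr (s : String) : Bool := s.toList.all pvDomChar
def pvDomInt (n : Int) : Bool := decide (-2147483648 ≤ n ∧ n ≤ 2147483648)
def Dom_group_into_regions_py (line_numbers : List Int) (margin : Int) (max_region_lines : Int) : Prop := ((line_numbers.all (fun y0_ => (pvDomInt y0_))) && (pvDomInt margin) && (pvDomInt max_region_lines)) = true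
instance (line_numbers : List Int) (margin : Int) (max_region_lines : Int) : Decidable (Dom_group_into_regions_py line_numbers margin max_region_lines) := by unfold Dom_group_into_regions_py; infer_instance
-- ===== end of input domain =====

-- B replaces A's stateful current_start/current_end region building with stateless cluster
-- boundaries (two filtered comprehensions over adjacent pairs, zipped into clusters) and
-- replaces the oversized-split while-loop with a zip of chunk starts with shifted ends
-- (objective: alternative; return value only, no mutation).


-- ===== PORT A =====
-- A's merge step over (regions, current_start, current_end)
def aStep (margin : Int) (st : List (Int × Int) × Int × Int) (ln : Int) : List (Int × Int) × Int × Int :=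
  if ln - margin ≤ st.2.2 then (st.1, st.2.1, ln + margin)
  else (st.1 ++ [(max 1 st.2.1, st.2.2)], ln - margin, ln + margin)

-- A's inner while-loop: split one region into chunks of max_region_lines.
-- Python diverges when M ≤ 0 and e - s + 1 > M; that is excluded by Pre_;
-- the M ≤ 0 guard only makes the recursion total (Python returns [(s, e)] whenever
-- it returns at all with M ≤ 0).
def aSplit (M s e : Int) : List (Int × Int) :=
  if _hM : M ≤ 0 then [(s, e)]
  else if _h : e - s + 1 > M then (s, s + M - 1) :: aSplit M (s + M) e
  else [(s, e)]
termination_by (e + 1 - s).toNat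
decreasing_by simp at _hM; omega

def group_into_regions_py (line_numbers : List Int) (margin : Int) (max_region_lines : Int) : List (Int × Int) :=
  match line_numbers with
  | [] => []
  | x :: rest =>
    let st := rest.foldl (aStep margin) ([], x - margin, x + margin)
    let regions := st.1 ++ [(max 1 st.2.1, st.2.2)]
    regions.foldl (fun acc p => acc ++ aSplit max_region_lines p.1 p.2) []

-- ===== PORT B =====
-- B's big-gap adjacent pairs: [(a, b) for a, b in zip(xs, xs[1:]) if b - a > 2 * margin]
def bGaps (margin : Int) (xs : List Int) : List (Int × Int) :=
  (xs.zip xs.tail).filter (fun p => p.2 - p.1 > 2 * margin)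

-- B's chunking of one cluster: arithmetic progression of chunk starts zipped with shifted ends
def bPiece (margin M first last : Int) : List (Int × Int) :=
  let s := max 1 (first - margin)
  let e := last + margin
  let starts := (List.range ((max 0 (PySem.Int.floordiv (e - s) M)).toNat + 1)).map
    (fun (k : Nat) => s + (k : Int) * M)
  starts.zip ((starts.tail.map (fun t => t - 1)) ++ [e])

def group_into_regions_py_alt (line_numbers : List Int) (margin : Int) (max_region_lines : Int) : List (Int × Int) :=
  match line_numbers with
  | [] => []
  | x :: rest =>
    let gaps := bGaps margin (x :: rest)
    let firsts := x :: gaps.map Prod.snd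
    -- line_numbers[-1]: the list is non-empty here, so getD's default is unreachable
    let lasts := gaps.map Prod.fst ++ [rest.getLast?.getD x]
    (firsts.zip lasts).foldl (fun acc c => acc ++ bPiece margin max_region_lines c.1 c.2) []

-- ===== PRECONDITION & SPEC =====
-- Pre_ excludes non-empty inputs with max_region_lines ≤ 0: there A's split loop
-- diverges whenever a region exceeds max_region_lines (and B's '//' raises
-- ZeroDivisionError at 0); on the residual degenerate cases where every region is
-- already short, A returns unsplit regions while B raises or rounds differently.
def Pre_group_into_regions_py (line_numbers : List Int) (margin : Int) (max_region_lines : Int) : Prop :=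
  line_numbers = [] ∨ 1 ≤ max_region_lines
instance (line_numbers : List Int) (margin : Int) (max_region_lines : Int) : Decidable (Pre_group_into_regions_py line_numbers margin max_region_lines) := by unfold Pre_group_into_regions_py; infer_instance

def pvWitness_group_into_regions_py : List Int × Int × Int := ([10, 30, 200], 40, 100)

def Spec_group_into_regions_py (line_numbers : List Int) (margin : Int) (max_region_lines : Int) (out : List (Int × Int)) : Prop := out = group_into_regions_py_alt line_numbers margin max_region_lines
instance (line_numbers : List Int) (margin : Int) (max_region_lines : Int) (out : List (Int × Int)) : Decidable (Spec_group_into_regions_py line_numbers margin max_region_lines out) := by unfold Spec_group_into_regions_py; infer_instance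

-- ===== CLAIM (what is proved, stated in full; the proofs are below) =====
def Claim_equal_group_into_regions_py : Prop := ∀ (line_numbers : List Int) (margin : Int) (max_region_lines : Int), Dom_group_into_regions_py line_numbers margin max_region_lines → Pre_group_into_regions_py line_numbers margin max_region_lines → Spec_group_into_regions_py line_numbers margin max_region_lines (group_into_regions_py line_numbers margin max_region_lines)

-- ===== LEMMAS AND PROOFS =====

-- proof-side cluster builder: extend the last cluster (first, last) or start a new one
def bStep (margin : Int) (cl : List (Int × Int)) (ln : Int) : List (Int × Int) :=
  match cl.getLast? with
  | some c => if ln - c.2 ≤ 2 * margin then cl.dropLast ++ [(c.1, ln)] else cl ++ [(ln, ln)]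
  | none => cl ++ [(ln, ln)]

-- region view of a list of clusters
def regOf (margin : Int) (cl : List (Int × Int)) : List (Int × Int) :=
  cl.map (fun c => (max 1 (c.1 - margin), c.2 + margin))

lemma sim (margin : Int) : ∀ (rest : List Int) (cl : List (Int × Int)) (f l : Int),
    (let a := rest.foldl (aStep margin) (regOf margin cl, f - margin, l + margin)
     a.1 ++ [(max 1 a.2.1, a.2.2)]) = regOf margin (rest.foldl (bStep margin) (cl ++ [(f, l)])) := by
  intro rest
  induction rest with
  | nil =>
      intro cl f l
      simp [regOf, List.map_append]
  | cons ln rest ih =>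
      intro cl f l
      simp only [List.foldl_cons]
      by_cases h : ln - margin ≤ l + margin
      · have ha : aStep margin (regOf margin cl, f - margin, l + margin) ln
            = (regOf margin cl, f - margin, ln + margin) := by
          simp [aStep, h]
        have hb : bStep margin (cl ++ [(f, l)]) ln = cl ++ [(f, ln)] := by
          simp only [bStep, List.getLast?_concat]
          have : ln - l ≤ 2 * margin := by omega
          simp [this]
        rw [ha, hb]
        exact ih cl f ln
      · have ha : aStep margin (regOf margin cl, f - margin, l + margin) ln
            = (regOf margin cl ++ [(max 1 (f - margin), l + margin)], ln - margin, ln + margin) := by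
          simp [aStep, h]
        have hb : bStep margin (cl ++ [(f, l)]) ln = (cl ++ [(f, l)]) ++ [(ln, ln)] := by
          simp only [bStep, List.getLast?_concat]
          have : ¬ (ln - l ≤ 2 * margin) := by omega
          simp [this]
        rw [ha, hb]
        have := ih (cl ++ [(f, l)]) ln ln
        simpa [regOf, List.map_append] using this

-- adjacent-pairs list of a non-empty list extended on the right
lemma adj_append (x0 : Int) : ∀ (ys : List Int) (x : Int),
    ((x0 :: ys) ++ [x]).zip (ys ++ [x]) = (x0 :: ys).zip ys ++ [(ys.getLast?.getD x0, x)] := by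
  intro ys
  induction ys generalizing x0 with
  | nil => intro x; simp
  | cons y ys' ih =>
      intro x
      have h1 : ((x0 :: y :: ys') ++ [x]).zip ((y :: ys') ++ [x])
          = (x0, y) :: (((y :: ys') ++ [x]).zip (ys' ++ [x])) := by simp
      rw [h1, ih y x]
      have hL : (y :: ys').getLast?.getD x0 = ys'.getLast?.getD y := by
        induction ys' using List.reverseRecOn with
        | nil => rfl
        | append_singleton ws w _ =>
            rw [show y :: (ws ++ [w]) = (y :: ws) ++ [w] from rfl,
              List.getLast?_concat, List.getLast?_concat]
            rfl
      simp [hL]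

-- B's two filtered comprehensions, zipped, build exactly the bStep clusters
lemma clusters_eq (m x0 : Int) : ∀ (ys : List Int),
    (x0 :: (bGaps m (x0 :: ys)).map Prod.snd).zip
        ((bGaps m (x0 :: ys)).map Prod.fst ++ [ys.getLast?.getD x0])
      = (x0 :: ys).foldl (bStep m) [] := by
  intro ys
  induction ys using List.reverseRecOn with
  | nil => simp [bGaps, bStep]
  | append_singleton ys' x ih =>
      have hadj : ((x0 :: ys') ++ [x]).zip (((x0 :: ys') ++ [x]).tail)
          = (x0 :: ys').zip ys' ++ [(ys'.getLast?.getD x0, x)] := by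
        simpa using adj_append x0 ys' x
      have hgaps : bGaps m ((x0 :: ys') ++ [x])
          = bGaps m (x0 :: ys')
            ++ (if x - ys'.getLast?.getD x0 > 2 * m then [(ys'.getLast?.getD x0, x)] else []) := by
        simp only [bGaps, hadj, List.filter_append]
        congr 1
        by_cases h : x - ys'.getLast?.getD x0 > 2 * m <;> simp [h]
      set l := ys'.getLast?.getD x0 with hl
      set F := bGaps m (x0 :: ys') with hF
      obtain ⟨G, g, hGg, hGlen⟩ :
          ∃ G g, x0 :: F.map Prod.snd = G ++ [g] ∧ G.length = (F.map Prod.fst).length := by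
        refine ⟨(x0 :: F.map Prod.snd).dropLast, (x0 :: F.map Prod.snd).getLast (by simp), ?_, ?_⟩
        · exact (List.dropLast_append_getLast (by simp)).symm
        · simp
      have hzipIH : (x0 :: F.map Prod.snd).zip (F.map Prod.fst ++ [l])
          = G.zip (F.map Prod.fst) ++ [(g, l)] := by
        rw [hGg, List.zip_append hGlen]; simp
      have hC : (x0 :: ys').foldl (bStep m) [] = G.zip (F.map Prod.fst) ++ [(g, l)] := by
        rw [← ih, hzipIH]
      have hfold : ((x0 :: ys') ++ [x]).foldl (bStep m) []
          = bStep m ((x0 :: ys').foldl (bStep m) []) x := by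
        simp [List.foldl_append]
      have hlast' : (ys' ++ [x]).getLast?.getD x0 = x := by simp
      rw [show x0 :: (ys' ++ [x]) = (x0 :: ys') ++ [x] from rfl]
      by_cases h : x - l > 2 * m
      · -- new cluster
        have hg2 : bGaps m ((x0 :: ys') ++ [x]) = F ++ [(l, x)] := by
          simpa [h] using hgaps
        rw [hg2, hlast']
        have hfl : x0 :: (F ++ [(l, x)]).map Prod.snd = (x0 :: F.map Prod.snd) ++ [x] := by simp
        have hll : (F ++ [(l, x)]).map Prod.fst ++ [x] = (F.map Prod.fst ++ [l]) ++ [x] := by simp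
        rw [hfl, hll, List.zip_append (by simp), hzipIH, hfold, hC]
        have hgl : (G.zip (F.map Prod.fst) ++ [(g, l)]).getLast? = some (g, l) := by simp
        simp only [bStep, hgl]
        have hcond : ¬ (x - (g, l).2 ≤ 2 * m) := by simp only; omega
        simp [hcond]
      · -- merge into last cluster
        have hg2 : bGaps m ((x0 :: ys') ++ [x]) = F := by simpa [h] using hgaps
        rw [hg2, hlast', hGg, List.zip_append hGlen, hfold, hC]
        have hgl : (G.zip (F.map Prod.fst) ++ [(g, l)]).getLast? = some (g, l) := by simp
        simp only [bStep, hgl]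
        have hcond : x - (g, l).2 ≤ 2 * m := by simp only; omega
        simp [hcond]

-- canonical closed form of one split region
lemma split_eq (M : Int) (hM : 1 ≤ M) : ∀ (n : Nat) (s e : Int), (e + 1 - s).toNat ≤ n →
    aSplit M s e = (List.range (max 0 (PySem.Int.floordiv (e - s) M)).toNat).map
        (fun (i : Nat) => (s + (i : Int) * M, s + (i : Int) * M + M - 1))
      ++ [(s + (max 0 (PySem.Int.floordiv (e - s) M)) * M, e)] := by
  intro n
  induction n with
  | zero =>
      intro s e hn
      have hle : ¬ (e - s + 1 > M) := by omega
      have hfd : PySem.Int.floordiv (e - s) M < 1 := by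
        rw [PySem.Int.floordiv_lt_iff_lt_mul (by omega)]; omega
      have hq : max 0 (PySem.Int.floordiv (e - s) M) = 0 := by omega
      rw [aSplit, dif_neg (show ¬ M ≤ 0 by omega), dif_neg hle, hq]
      simp
  | succ n ih =>
      intro s e hn
      by_cases hbig : e - s + 1 > M
      · have hq1 : 1 ≤ PySem.Int.floordiv (e - s) M := by
          rw [PySem.Int.le_floordiv_iff_mul_le (by omega)]; omega
        have hstep : PySem.Int.floordiv (e - (s + M)) M = PySem.Int.floordiv (e - s) M - 1 := by
          have h1 : e - (s + M) = (e - s) + (-1) * M := by ring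
          rw [h1, PySem.Int.floordiv_eq_ediv_of_pos (by omega), PySem.Int.floordiv_eq_ediv_of_pos (by omega),
            Int.add_mul_ediv_right _ _ (by omega : M ≠ 0)]
          omega
        rw [aSplit, dif_neg (show ¬ M ≤ 0 by omega), dif_pos hbig, ih (s + M) e (by omega), hstep]
        obtain ⟨q, hq⟩ : ∃ q, PySem.Int.floordiv (e - s) M = q := ⟨_, rfl⟩
        rw [hq] at hq1 ⊢
        rw [(show max 0 (q - 1) = q - 1 by omega), (show max 0 q = q by omega)]
        have hqn : q.toNat = (q - 1).toNat + 1 := by omega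
        rw [hqn, List.range_succ_eq_map, List.map_cons, List.map_map, List.cons_append]
        congr 1
        · simp
        congr 1
        · apply List.map_congr_left; intro i _
          simp only [Function.comp_apply, Prod.mk.injEq]
          have hi : ((i.succ : Nat) : Int) = (i : Int) + 1 := by push_cast; ring
          rw [hi]
          constructor <;> ring
        · have h2 : s + M + (q - 1) * M = s + q * M := by ring
          rw [h2]
      · have hfd : PySem.Int.floordiv (e - s) M < 1 := by
          rw [PySem.Int.floordiv_lt_iff_lt_mul (by omega)]; omega
        have hq : max 0 (PySem.Int.floordiv (e - s) M) = 0 := by omega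
        rw [aSplit, dif_neg (show ¬ M ≤ 0 by omega), dif_neg hbig, hq]
        simp

-- B's zip-of-shifted-starts equals the canonical closed form
lemma zipform (M e : Int) : ∀ (n : Nat) (s : Int),
    (((List.range (n + 1)).map (fun (k : Nat) => s + (k : Int) * M)).zip
      ((((List.range (n + 1)).map (fun (k : Nat) => s + (k : Int) * M)).tail.map (fun t => t - 1)) ++ [e]))
    = ((List.range n).map (fun (i : Nat) => (s + (i : Int) * M, s + (i : Int) * M + M - 1)))
      ++ [(s + (n : Int) * M, e)] := by
  intro n
  induction n with
  | zero => intro s; simp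
  | succ n ih =>
      intro s
      have hdec : ∀ (m : Nat) (u : Int), (List.range (m + 1)).map (fun (k : Nat) => u + (k : Int) * M)
          = u :: (List.range m).map (fun (k : Nat) => (u + M) + (k : Int) * M) := by
        intro m u
        rw [List.range_succ_eq_map, List.map_cons, List.map_map]
        congr 1
        · simp
        · apply List.map_congr_left; intro i _
          simp only [Function.comp_apply]
          push_cast; ring
      have hIH := ih (s + M)
      rw [hdec n (s + M)] at hIH
      simp only [List.tail_cons] at hIH
      rw [hdec (n + 1) s, hdec n (s + M)]
      simp only [List.tail_cons, List.map_cons, List.cons_append, List.zip_cons_cons]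
      rw [hIH]
      rw [List.range_succ_eq_map, List.map_cons, List.map_map, List.cons_append]
      congr 1
      · simp
      congr 1
      · apply List.map_congr_left; intro i _
        simp only [Function.comp_apply, Prod.mk.injEq]
        have hi : ((i.succ : Nat) : Int) = (i : Int) + 1 := by push_cast; ring
        rw [hi]
        constructor <;> ring
      · have : s + M + (n : Int) * M = s + ((n : Nat).succ : Int) * M := by push_cast; ring
        rw [this]

lemma piece_eq (m M : Int) (hM : 1 ≤ M) (first last : Int) :
    aSplit M (max 1 (first - m)) (last + m) = bPiece m M first last := by
  simp only [bPiece]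
  rw [zipform]
  rw [split_eq M hM (last + m + 1 - max 1 (first - m)).toNat _ _ le_rfl]
  have hq0 : (0 : Int) ≤ max 0 (PySem.Int.floordiv (last + m - max 1 (first - m)) M) := le_max_left _ _
  rw [Int.toNat_of_nonneg hq0]

-- ===== VERDICT (by name: the statement is the Claim_ definition above) =====
theorem group_into_regions_py_spec : Claim_equal_group_into_regions_py := by
  intro line_numbers margin M _ hpre
  unfold Spec_group_into_regions_py
  match line_numbers, hpre with
  | [], _ => rfl
  | x :: rest, hpre =>
    have hM : 1 ≤ M := by
      rcases hpre with h | h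
      · exact absurd h (by simp)
      · exact h
    simp only [group_into_regions_py, group_into_regions_py_alt]
    rw [clusters_eq margin x rest]
    have hb0 : (x :: rest).foldl (bStep margin) [] = rest.foldl (bStep margin) ([] ++ [(x, x)]) := by
      simp [bStep]
    rw [hb0]
    have hsim := sim margin rest [] x x
    simp only [regOf, List.map_nil] at hsim
    rw [hsim]
    generalize List.foldl (bStep margin) ([] ++ [(x, x)]) rest = cl
    induction cl using List.reverseRecOn with
    | nil => simp
    | append_singleton cl c ih =>
        simp only [List.map_append, List.map_cons, List.map_nil,
          List.foldl_append, List.foldl_cons, List.foldl_nil]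
        rw [ih, piece_eq margin M hM]
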